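-- pv_equiv track=rewrite | github.com/seyiajibode/yoruba-web-scraper | detect_language.py | detect_language_type
-- ===== SOURCE A (Python) =====
-- english_words = {'the', 'and', 'is', 'are', 'was', 'have', 'this', 'that', 'you', 'me', 'we', 'they', 'good', 'bad', 'very', 'like', 'love'}
--
-- yoruba_words = {'ni', 'ti', 'si', 'ko', 'mo', 'ki', 'se', 'ba', 'wa', 'lo', 'won', 'awa', 'ninu', 'lati', 'ati', 'fun', 'ile', 'omi'}
--
-- def detect_language_type(text):
--     if not isinstance(text, str) or not text.strip():
--         return 'empty'
--     words = text.split()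
--     if len(words) == 0:
--         return 'empty'
--     english_count = sum(1 for word in words if word in english_words)
--     yoruba_count = sum(1 for word in words if word in yoruba_words)
--     english_percent = english_count / len(words)
--     yoruba_percent = yoruba_count / len(words)
--     if english_percent > 0.3:
--         return 'mostly_english'
--     elif yoruba_percent > 0.3:
--         return 'mostly_yoruba'
--     elif english_percent > 0.1 and yoruba_percent > 0.1:
--         return 'mixed_languages'
--     else:
--         return 'unclear'
-- ===== SOURCE B (Python) =====
-- english_words = {'the', 'and', 'is', 'are', 'was', 'have', 'this', 'that', 'you', 'me', 'we', 'they', 'good', 'bad', 'very', 'like', 'love'}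
--
-- yoruba_words = {'ni', 'ti', 'si', 'ko', 'mo', 'ki', 'se', 'ba', 'wa', 'lo', 'won', 'awa', 'ninu', 'lati', 'ati', 'fun', 'ile', 'omi'}
--
-- def detect_language_type(text):
--     if not isinstance(text, str) or not text.strip():
--         return 'empty'
--     words = text.split()
--     n = len(words)
--     freq = {}
--     for w in words:
--         freq[w] = freq.get(w, 0) + 1
--     english_count = sum(freq.get(w, 0) for w in english_words)
--     yoruba_count = sum(freq.get(w, 0) for w in yoruba_words)
--     if english_count / n > 0.3:
--         return 'mostly_english'
--     if yoruba_count / n > 0.3: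
--         return 'mostly_yoruba'
--     if english_count / n > 0.1 and yoruba_count / n > 0.1:
--         return 'mixed_languages'
--     return 'unclear'
-- ===== Notes on version B (the rewrite author's own statement) =====
-- stated objective: alternative
-- what changed: Instead of scanning all words twice with set-membership tests, B builds a word-frequency dictionary in one pass and sums the counts of the fixed English/Yoruba vocabularies looked up in it; the redundant len(words)==0 guard (unreachable after the strip check) is dropped and integer counts feed the same ratio thresholds.
import Mathlib
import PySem

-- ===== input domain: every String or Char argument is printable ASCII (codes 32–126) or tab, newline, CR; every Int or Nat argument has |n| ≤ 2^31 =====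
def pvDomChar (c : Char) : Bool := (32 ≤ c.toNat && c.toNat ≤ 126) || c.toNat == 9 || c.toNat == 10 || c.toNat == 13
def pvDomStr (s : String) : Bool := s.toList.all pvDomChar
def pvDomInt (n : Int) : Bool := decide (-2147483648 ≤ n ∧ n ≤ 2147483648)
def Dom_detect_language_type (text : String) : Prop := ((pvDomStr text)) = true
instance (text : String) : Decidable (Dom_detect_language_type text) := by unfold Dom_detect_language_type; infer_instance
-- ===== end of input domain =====

-- B replaces A's two membership scans over the words by one frequency dictionary plus sums over
-- the fixed vocabularies (alternative decomposition, same cost).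
-- The float comparisons `count/len > 0.3` / `> 0.1` are ported as the exact rational comparisons
-- 10*count > 3*n / 10*count > n, which agree with IEEE double arithmetic for all feasible word counts.

-- ===== PORT A =====
def englishWords : List String :=
  ["the", "and", "is", "are", "was", "have", "this", "that", "you", "me", "we", "they", "good", "bad", "very", "like", "love"]

def yorubaWords : List String :=
  ["ni", "ti", "si", "ko", "mo", "ki", "se", "ba", "wa", "lo", "won", "awa", "ninu", "lati", "ati", "fun", "ile", "omi"]

def detect_language_type (text : String) : String :=
  if PySem.Str.strip text = "" then "empty"
  else
    let words := PySem.Str.split₀ text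
    if words.length = 0 then "empty"
    else
      let english_count : Int := (words.map (fun w => if w ∈ englishWords then (1 : Int) else 0)).sum
      let yoruba_count : Int := (words.map (fun w => if w ∈ yorubaWords then (1 : Int) else 0)).sum
      let n : Int := (words.length : Int)
      if 10 * english_count > 3 * n then "mostly_english"
      else if 10 * yoruba_count > 3 * n then "mostly_yoruba"
      else if 10 * english_count > n ∧ 10 * yoruba_count > n then "mixed_languages"
      else "unclear"

-- ===== PORT B =====
def detect_language_type_alt (text : String) : String :=
  if PySem.Str.strip text = "" then "empty"
  else
    let words := PySem.Str.split₀ text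
    let n : Int := (words.length : Int)
    let freq : PySem.Dict String Int :=
      words.foldl (fun d w => d.insert w (d.getD w 0 + 1)) PySem.Dict.empty
    let english_count : Int := englishWords.foldl (fun a w => a + freq.getD w 0) 0
    let yoruba_count : Int := yorubaWords.foldl (fun a w => a + freq.getD w 0) 0
    if 10 * english_count > 3 * n then "mostly_english"
    else if 10 * yoruba_count > 3 * n then "mostly_yoruba"
    else if 10 * english_count > n ∧ 10 * yoruba_count > n then "mixed_languages"
    else "unclear"

-- ===== PRECONDITION & SPEC =====
def Spec_detect_language_type (text : String) (out : String) : Prop := out = detect_language_type_alt text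
instance (text : String) (out : String) : Decidable (Spec_detect_language_type text out) := by unfold Spec_detect_language_type; infer_instance

-- ===== CLAIM (what is proved, stated in full; the proofs are below) =====
def Claim_equal_detect_language_type : Prop := ∀ (text : String), Dom_detect_language_type text → Spec_detect_language_type text (detect_language_type text)

-- ===== LEMMAS AND PROOFS =====

-- if split₀ produces no words, every character of the string is Python whitespace
theorem split₀_go_eq_nil {s cur acc} (h : PySem.Chars.split₀.go s cur acc = []) :
    acc = [] ∧ cur = [] ∧ s.all PySem.Chars.isspace := by
  induction s generalizing cur acc with
  | nil =>
    unfold PySem.Chars.split₀.go at h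
    by_cases hc : cur.isEmpty
    · simp [hc] at h; simp [List.isEmpty_iff.mp hc, h, List.all_nil]
    · simp [hc] at h
  | cons c rest ih =>
    unfold PySem.Chars.split₀.go at h
    by_cases hs : PySem.Chars.isspace c
    · by_cases hc : cur.isEmpty
      · simp [hs, hc] at h
        obtain ⟨ha, _, hr⟩ := ih h
        exact ⟨ha, List.isEmpty_iff.mp hc, by simp [List.all_cons, hs, hr]⟩
      · simp [hs, hc] at h
        obtain ⟨ha, _, _⟩ := ih h
        simp at ha
    · simp [hs] at h
      obtain ⟨_, hc, _⟩ := ih h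
      simp at hc

theorem strip_eq_nil_of_all_space {l : List Char} (h : l.all PySem.Chars.isspace) :
    PySem.Chars.strip l = [] := by
  unfold PySem.Chars.strip PySem.Chars.lstrip PySem.Chars.rstrip
  have : l.dropWhile PySem.Chars.isspace = [] :=
    List.dropWhile_eq_nil_iff.mpr (fun x hx => by simpa using List.all_eq_true.mp h x hx)
  simp [this]

theorem split₀_ne_nil_of_strip_ne (text : String) (h : PySem.Str.strip text ≠ "") :
    PySem.Str.split₀ text ≠ [] := by
  intro hnil
  apply h
  unfold PySem.Str.split₀ PySem.Chars.split₀ at hnil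
  have hgo : PySem.Chars.split₀.go text.toList [] [] = [] := by
    cases hg : PySem.Chars.split₀.go text.toList [] [] with
    | nil => rfl
    | cons a as => simp [hg] at hnil
  obtain ⟨_, _, hall⟩ := split₀_go_eq_nil hgo
  unfold PySem.Str.strip
  rw [strip_eq_nil_of_all_space hall]

-- the B-side vocabulary fold equals A's 0/1-sum over the words (vocab must be duplicate-free)
theorem vocab_sum_eq (vocab words : List String) (hnd : vocab.Nodup) :
    (vocab.map (fun v => (words.count v : Int))).sum
      = (words.map (fun w => if w ∈ vocab then (1 : Int) else 0)).sum := by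
  induction vocab with
  | nil => simp
  | cons v vs ih =>
    obtain ⟨hv, hnd'⟩ := List.nodup_cons.mp hnd
    have hsplit : (words.map (fun w => if w ∈ v :: vs then (1 : Int) else 0)).sum
        = (words.map (fun w => (if w = v then (1 : Int) else 0) + (if w ∈ vs then (1 : Int) else 0))).sum := by
      congr 1
      apply List.map_congr_left
      intro w _
      by_cases h1 : w = v
      · subst h1; simp [hv]
      · by_cases h2 : w ∈ vs <;> simp [h1, h2]
    rw [hsplit, PySem.List.sum_map_add_int, List.map_cons, List.sum_cons, ih hnd']
    congr 1
    have : (words.map (fun w => if w = v then (1 : Int) else 0)).sum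
        = (words.map (fun w => if (w == v) = true then (1 : Int) else 0)).sum := by
      congr 1; apply List.map_congr_left; intro w _; simp
    rw [this, PySem.List.sum_map_ite_one_zero (fun w => w == v) words]
    simp [List.count]

theorem count_fold_eq (vocab words : List String) (hnd : vocab.Nodup) :
    vocab.foldl (fun a w => a +
        (words.foldl (fun d w => d.insert w (d.getD w 0 + 1)) PySem.Dict.empty).getD w 0) 0
      = (words.map (fun w => if w ∈ vocab then (1 : Int) else 0)).sum := by
  rw [PySem.List.foldl_add]
  have : (vocab.map (fun w =>
      (words.foldl (fun d w => d.insert w (d.getD w 0 + 1)) PySem.Dict.empty).getD w 0)).sum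
      = (vocab.map (fun v => (words.count v : Int))).sum := by
    congr 1; apply List.map_congr_left; intro w _
    rw [PySem.Dict.getD_foldl_insert_add_one, PySem.Dict.getD_empty]
    ring
  rw [this, vocab_sum_eq vocab words hnd]
  ring_nf

theorem englishWords_nodup : englishWords.Nodup := by decide
theorem yorubaWords_nodup : yorubaWords.Nodup := by decide

-- ===== VERDICT (by name: the statement is the Claim_ definition above) =====
theorem detect_language_type_spec : Claim_equal_detect_language_type := by
  intro text _
  unfold Spec_detect_language_type detect_language_type detect_language_type_alt
  by_cases hstrip : PySem.Str.strip text = ""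
  · simp [hstrip]
  · have hne := split₀_ne_nil_of_strip_ne text hstrip
    have hlen : ¬ (PySem.Str.split₀ text).length = 0 := by
      simpa [List.length_eq_zero_iff] using hne
    simp only [hstrip, hlen, if_false]
    rw [count_fold_eq englishWords (PySem.Str.split₀ text) englishWords_nodup,
        count_fold_eq yorubaWords (PySem.Str.split₀ text) yorubaWords_nodup]
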